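-- pv_equiv track=rewrite | github.com/lucasdeazandona/Jogo_Da_Forca | ValidaTentativasDesafiado/ValidateTentativas.py | Verifica_Achou_Todas_Letras
-- ===== SOURCE A (Python) =====
-- def Verifica_Achou_Todas_Letras(Letras_Encontradas):
--     Indice_Letra = 0
--     vVeririficaLetras = ''
--
--     for vVeririficaLetras in Letras_Encontradas:
--         if vVeririficaLetras == 'S':
--             Indice_Letra +=1
--         else:
--             Indice_Letra -=1
--
--     if Indice_Letra == len(Letras_Encontradas):
--         return True
--     else:
--         return False
-- ===== SOURCE B (Python) =====
-- def Verifica_Achou_Todas_Letras(Letras_Encontradas):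
--     return set(Letras_Encontradas).issubset({'S'})
-- ===== Notes on version B (the rewrite author's own statement) =====
-- stated objective: idiomatic
-- what changed: Replaces the +1/-1 running counter compared against len() with a direct set-subset test: set(Letras_Encontradas).issubset({'S'}).
import Mathlib
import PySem

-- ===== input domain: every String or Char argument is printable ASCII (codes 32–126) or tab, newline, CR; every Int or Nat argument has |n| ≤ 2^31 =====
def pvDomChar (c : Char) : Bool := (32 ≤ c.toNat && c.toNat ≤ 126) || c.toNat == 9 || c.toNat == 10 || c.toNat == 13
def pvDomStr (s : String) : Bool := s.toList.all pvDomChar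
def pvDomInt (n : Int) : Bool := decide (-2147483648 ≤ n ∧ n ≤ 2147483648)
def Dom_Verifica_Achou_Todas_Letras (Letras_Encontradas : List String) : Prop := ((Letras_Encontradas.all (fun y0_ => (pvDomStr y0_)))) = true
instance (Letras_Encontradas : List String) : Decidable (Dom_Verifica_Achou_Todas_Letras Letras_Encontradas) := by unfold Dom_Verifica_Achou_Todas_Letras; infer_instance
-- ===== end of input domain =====

-- ===== PORT A =====
-- A: running counter, +1 for 'S', -1 otherwise; True iff counter == len
def Verifica_Achou_Todas_Letras (Letras_Encontradas : List String) : Bool :=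
  let Indice_Letra : Int :=
    Letras_Encontradas.foldl
      (fun acc v => if v == "S" then acc + 1 else acc - 1) 0
  if Indice_Letra == (Letras_Encontradas.length : Int) then true else false

-- ===== PORT B =====
-- B: set(Letras_Encontradas).issubset({'S'})
def Verifica_Achou_Todas_Letras_alt (Letras_Encontradas : List String) : Bool :=
  PySem.Set.issubset (PySem.Set.ofList Letras_Encontradas) (PySem.Set.ofList ["S"])

-- ===== PRECONDITION & SPEC =====
def Spec_Verifica_Achou_Todas_Letras (Letras_Encontradas : List String) (out : Bool) : Prop := out = Verifica_Achou_Todas_Letras_alt Letras_Encontradas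
instance (Letras_Encontradas : List String) (out : Bool) : Decidable (Spec_Verifica_Achou_Todas_Letras Letras_Encontradas out) := by unfold Spec_Verifica_Achou_Todas_Letras; infer_instance

-- ===== CLAIM (what is proved, stated in full; the proofs are below) =====
def Claim_equal_Verifica_Achou_Todas_Letras : Prop := ∀ (Letras_Encontradas : List String), Dom_Verifica_Achou_Todas_Letras Letras_Encontradas → Spec_Verifica_Achou_Todas_Letras Letras_Encontradas (Verifica_Achou_Todas_Letras Letras_Encontradas)

-- ===== LEMMAS AND PROOFS =====

-- ===== VERDICT (by name: the statement is the Claim_ definition above) =====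
theorem counter_key (xs : List String) : ∀ (a : Int),
    xs.foldl (fun acc v => if v == "S" then acc + 1 else acc - 1) a
      = a + xs.length - 2 * ((xs.countP (fun v => !(v == "S"))) : Int) := by
  induction xs with
  | nil => intro a; simp
  | cons h t ih =>
    intro a
    rw [List.foldl_cons, List.countP_cons]
    by_cases hS : (h == "S") = true
    · have h2 : (!(h == "S")) = false := by simp [hS]
      rw [if_pos hS, ih]
      simp only [h2, Bool.false_eq_true, if_false, List.length_cons]
      push_cast; ring
    · have h2 : (!(h == "S")) = true := by simpa using hS
      rw [if_neg hS, ih]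
      simp only [h2, if_true, List.length_cons]
      push_cast; ring

theorem counter_char (xs : List String) :
    ((xs.foldl (fun acc v => if v == "S" then acc + 1 else acc - 1) (0:Int))
      == (xs.length : Int)) = xs.all (fun v => v == "S") := by
  rw [counter_key xs 0]
  have hle : xs.countP (fun v => !(v == "S")) ≤ xs.length := List.countP_le_length
  have hc : xs.countP (fun v => !(v == "S")) = 0 ↔ (xs.all (fun v => v == "S")) = true := by
    rw [List.countP_eq_zero, List.all_eq_true]
    simp
  cases hall : xs.all (fun v => v == "S") with
  | true =>
    have h0 := hc.2 hall
    simp [h0]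
  | false =>
    have hne : xs.countP (fun v => !(v == "S")) ≠ 0 := by
      intro h0; rw [hc.1 h0] at hall; cases hall
    rw [beq_eq_false_iff_ne]
    omega

theorem alt_char (xs : List String) :
    Verifica_Achou_Todas_Letras_alt xs = xs.all (fun v => v == "S") := by
  unfold Verifica_Achou_Todas_Letras_alt
  by_cases h : xs.all (fun v => v == "S")
  · simp only [h]
    rw [PySem.Set.issubset_iff]
    intro x hx
    have hx' : x ∈ xs := (PySem.Set.mem_ofList _ _).1 hx
    simp only [List.all_eq_true, beq_iff_eq] at h
    simp [h x hx', PySem.Set.ofList]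
  · simp only [h]
    rw [Bool.eq_false_iff]
    intro hsub
    rw [PySem.Set.issubset_iff] at hsub
    simp only [List.all_eq_true, not_forall] at h
    obtain ⟨x, hx, hne⟩ := h
    have := hsub x ((PySem.Set.mem_ofList _ _).2 hx)
    simp only [beq_iff_eq] at hne
    simp [PySem.Set.ofList, PySem.Set.add, PySem.Set.empty] at this
    exact hne (by simpa using this)

theorem Verifica_Achou_Todas_Letras_spec : Claim_equal_Verifica_Achou_Todas_Letras := by
  intro xs _
  unfold Spec_Verifica_Achou_Todas_Letras Verifica_Achou_Todas_Letras
  rw [alt_char]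
  simp only []
  rw [← counter_char xs]
  split_ifs with h <;> simp_all
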